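-- pv_equiv track=rewrite | github.com/flyerooo/MyForum | apps/users/tests.py | count_dict
-- ===== SOURCE A (Python) =====
-- from collections import OrderedDict
--
-- def count_dict(data):
--     num_count = {}
--     for num in data:
--         if num in num_count:
--             num_count[num] += 1
--         else:
--             num_count.update({num: 1})
--     return OrderedDict(sorted(num_count.items()))
-- ===== SOURCE B (Python) =====
-- from collections import OrderedDict
-- from itertools import groupby
--
--
-- def count_dict(data):
--     # Sort once, then run-length encode consecutive equal elements.
--     return OrderedDict((k, sum(1 for _ in g)) for k, g in groupby(sorted(data)))
-- ===== Notes on version B (the rewrite author's own statement) =====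
-- stated objective: alternative
-- what changed: B sorts the data once and run-length-encodes consecutive equal elements (itertools.groupby) instead of maintaining a membership-checked counting dict and then sorting its items.
import Mathlib
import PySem

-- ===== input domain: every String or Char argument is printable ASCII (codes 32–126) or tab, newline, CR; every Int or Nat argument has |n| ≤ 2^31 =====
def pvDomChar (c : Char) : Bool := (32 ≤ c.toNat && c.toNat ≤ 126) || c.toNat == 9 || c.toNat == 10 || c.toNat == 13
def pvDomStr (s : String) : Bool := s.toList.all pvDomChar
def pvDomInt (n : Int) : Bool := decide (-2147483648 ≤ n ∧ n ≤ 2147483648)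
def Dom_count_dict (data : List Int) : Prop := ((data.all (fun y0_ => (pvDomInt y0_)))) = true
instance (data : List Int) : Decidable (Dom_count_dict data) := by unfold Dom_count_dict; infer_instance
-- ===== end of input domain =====

-- B sorts the data once and run-length-encodes consecutive equal elements instead of
-- maintaining a membership-checked counting dict and then sorting its items (alternative algorithm).

-- ===== PORT A =====
def count_dict (data : List Int) : List (Int × Int) :=
  let num_count : PySem.Dict Int Int :=
    data.foldl (fun d num =>
      if d.contains num then d.modify num 0 (· + 1) else d.insert num 1)
      PySem.Dict.empty
  -- sorted(items) on pairs with a tuple key: PySem.List.sorted2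
  PySem.List.sorted2 num_count.items (fun p => p.1) (fun p => p.2)

-- ===== PORT B =====
-- itertools.groupby over a sorted list: each group is the run of consecutive equal
-- elements; the emitted pair is (key, length of the run).
def rleRuns : List Int → List (Int × Int)
  | [] => []
  | a :: t =>
    (a, 1 + ((t.takeWhile (· == a)).length : Int)) :: rleRuns (t.dropWhile (· == a))
termination_by s => s.length
decreasing_by
  simpa using Nat.lt_succ_of_le (List.length_dropWhile_le (· == a) t)

def count_dict_alt (data : List Int) : List (Int × Int) :=
  rleRuns (PySem.List.sorted data (fun x => x))

-- ===== PRECONDITION & SPEC =====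
def Spec_count_dict (data : List Int) (out : List (Int × Int)) : Prop := out = count_dict_alt data
instance (data : List Int) (out : List (Int × Int)) : Decidable (Spec_count_dict data out) := by unfold Spec_count_dict; infer_instance

-- ===== CLAIM (what is proved, stated in full; the proofs are below) =====
def Claim_equal_count_dict : Prop := ∀ (data : List Int), Dom_count_dict data → Spec_count_dict data (count_dict data)

-- ===== LEMMAS AND PROOFS =====

-- Canonical form both sides are reduced to: distinct elements in increasing order,
-- each paired with its multiplicity in `data`.
def canonCount (data : List Int) : List (Int × Int) :=
  (PySem.List.sorted (PySem.Set.ofList data) (fun x => x)).map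
    (fun k => (k, (data.count k : Int)))

-- A's counting loop builds exactly Counter(data).
lemma fold_eq_counter (data : List Int) :
    data.foldl (fun d num =>
      if d.contains num then d.modify num 0 (· + 1) else d.insert num 1)
      PySem.Dict.empty = PySem.Dict.counter data := by
  rw [← PySem.Dict.foldl_insert_getD_add_one_eq_counter]
  have hstep : (fun (d : PySem.Dict Int Int) num =>
      if d.contains num then d.modify num 0 (· + 1) else d.insert num 1)
      = fun d num => d.insert num (d.getD num 0 + 1) := by
    funext d num
    by_cases h : d.contains num
    · simp [h, PySem.Dict.modify]
    · rw [if_neg (by simp [h])]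
      rw [PySem.Dict.getD_of_not_contains d 0 (by simpa using h)]
      norm_num
  rw [hstep]

lemma insertBy_congr {α : Type} (f g : α → α → Bool) (x : α) (acc : List α)
    (h : ∀ b ∈ acc, f x b = g x b) :
    PySem.List.insertBy f x acc = PySem.List.insertBy g x acc := by
  induction acc with
  | nil => rfl
  | cons y ys ih =>
    simp only [PySem.List.insertBy]
    rw [h y (by simp)]
    by_cases hg : g x y = true
    · simp [hg]
    · simp only [Bool.not_eq_true] at hg
      simp only [hg]
      rw [ih (fun b hb => h b (by simp [hb]))]

lemma foldl_insertBy_congr {α : Type} (f g : α → α → Bool) (L : List α)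
    (hfg : ∀ a ∈ L, ∀ b ∈ L, f a b = g a b) :
    ∀ (xs acc : List α), (∀ x ∈ xs, x ∈ L) → (∀ x ∈ acc, x ∈ L) →
      xs.foldl (fun acc x => PySem.List.insertBy f x acc) acc
        = xs.foldl (fun acc x => PySem.List.insertBy g x acc) acc := by
  intro xs
  induction xs with
  | nil => intro acc _ _; rfl
  | cons x xs ih =>
    intro acc hxs hacc
    simp only [List.foldl_cons]
    rw [insertBy_congr f g x acc
      (fun b hb => hfg x (hxs x (by simp)) b (hacc b hb))]
    exact ih _ (fun y hy => hxs y (by simp [hy]))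
      (fun y hy => by
        rcases (PySem.List.mem_insertBy g x y acc).1 hy with h | h
        · exact h ▸ hxs x (by simp)
        · exact hacc y h)

-- On a list with pairwise-distinct first components, Python's lexicographic tuple
-- sort is the sort by first component.
lemma sorted2_eq_sorted_fst (L : List (Int × Int)) (hnd : (L.map Prod.fst).Nodup) :
    PySem.List.sorted2 L (fun p => p.1) (fun p => p.2)
      = PySem.List.sorted L (fun p => p.1) := by
  show L.foldl (fun acc x => PySem.List.insertBy _ x acc) []
      = L.foldl (fun acc x => PySem.List.insertBy _ x acc) []
  apply foldl_insertBy_congr _ _ L _ L [] (fun _ hx => hx) (by simp)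
  intro a ha b hb
  by_cases hab : a.1 = b.1
  · have : a = b := List.inj_on_of_nodup_map hnd ha hb hab
    subst this
    simp
  · rcases lt_or_gt_of_ne hab with h | h
    · simp [h]
    · simp [h, not_lt_of_gt h]

lemma count_dict_eq_canon (data : List Int) : count_dict data = canonCount data := by
  show PySem.List.sorted2 _ _ _ = _
  rw [fold_eq_counter, PySem.Dict.items_counter]
  rw [sorted2_eq_sorted_fst _ (by
    rw [List.map_map]
    have hid : (Prod.fst ∘ fun k => (k, ((data.count k : Nat) : Int))) = id := rfl
    rw [hid, List.map_id]
    exact PySem.Set.nodup_ofList data)]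
  apply PySem.List.sorted_eq_of_perm_of_pairwise_lt
  · exact List.Perm.map _ (PySem.List.sorted_perm (PySem.Set.ofList data) (fun x => x) false)
  · exact List.Pairwise.map _ (fun a b h => h) (PySem.List.sorted_ofList_pairwise_lt data)

-- Run-length encoding of a weakly increasing list lists each distinct value once,
-- in increasing order, with its multiplicity.
lemma rle_sorted_eq : ∀ (n : Nat) (s : List Int), s.length ≤ n → s.Pairwise (· ≤ ·) →
    rleRuns s = (PySem.List.sorted (PySem.Set.ofList s) (fun x => x)).map
      (fun k => (k, (s.count k : Int)))
  | _, [], _, _ => by simp [rleRuns, PySem.Set.ofList, PySem.List.sorted]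
  | 0, _ :: _, hlen, _ => absurd hlen (by simp)
  | Nat.succ n, a :: t, hlen, hp => by
    have hrun : ∀ x ∈ t.takeWhile (· == a), x = a := by
      intro x hx
      simpa using List.mem_takeWhile_imp hx
    have hsplit : t.takeWhile (· == a) ++ t.dropWhile (· == a) = t :=
      List.takeWhile_append_dropWhile
    have hrest_sub : (t.dropWhile (· == a)).Sublist t := List.dropWhile_sublist _
    have hrest_pw : (t.dropWhile (· == a)).Pairwise (· ≤ ·) :=
      List.Pairwise.sublist hrest_sub (List.Pairwise.of_cons hp)
    have hle : ∀ x ∈ t, a ≤ x := (List.pairwise_cons.1 hp).1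
    have hlt : ∀ x ∈ t.dropWhile (· == a), a < x := by
      cases hd : t.dropWhile (· == a) with
      | nil => intro x hx; simp at hx
      | cons b rest =>
        have hbt : b ∈ t := (hd ▸ hrest_sub).mem (by simp)
        have hba : ¬ (b == a) = true := by
          have := List.head?_dropWhile_not (· == a) t
          rw [hd] at this; simpa using this
        have hab : a < b := lt_of_le_of_ne (hle b hbt) (by simpa using Ne.symm (by simpa using hba))
        intro x hx
        rcases List.mem_cons.1 hx with rfl | hx'
        · exact hab
        · have hpw : (b :: rest).Pairwise (· ≤ ·) := hd ▸ hrest_pw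
          exact lt_of_lt_of_le hab ((List.pairwise_cons.1 hpw).1 x hx')
    have hanotin : a ∉ t.dropWhile (· == a) := fun h => lt_irrefl a (hlt a h)
    -- counts
    have hcount_a : ((a :: t).count a : Int) = 1 + ((t.takeWhile (· == a)).length : Int) := by
      have h1 : t.count a = (t.takeWhile (· == a)).count a + (t.dropWhile (· == a)).count a := by
        conv_lhs => rw [← hsplit]
        exact List.count_append
      have h2 : (t.takeWhile (· == a)).count a = (t.takeWhile (· == a)).length :=
        List.count_eq_length.2 (fun b hb => (hrun b hb).symm)
      have h3 : (t.dropWhile (· == a)).count a = 0 := List.count_eq_zero.2 hanotin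
      have : (a :: t).count a = t.count a + 1 := by simp
      omega
    have hcount_rest : ∀ k ∈ t.dropWhile (· == a), (a :: t).count k = (t.dropWhile (· == a)).count k := by
      intro k hk
      have hka : k ≠ a := fun h => lt_irrefl a (h ▸ hlt k hk)
      have h1 : (t.takeWhile (· == a)).count k = 0 :=
        List.count_eq_zero.2 (fun h => hka (hrun k h))
      have h2 : t.count k = (t.takeWhile (· == a)).count k + (t.dropWhile (· == a)).count k := by
        conv_lhs => rw [← hsplit]
        exact List.count_append
      have : (a :: t).count k = t.count k := by simp [Ne.symm hka]
      omega
    -- key list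
    have hkeys : PySem.List.sorted (PySem.Set.ofList (a :: t)) (fun x => x)
        = a :: PySem.List.sorted (PySem.Set.ofList (t.dropWhile (· == a))) (fun x => x) := by
      apply PySem.List.sorted_eq_of_perm_of_pairwise_lt
      · have hnd1 : (a :: PySem.List.sorted (PySem.Set.ofList (t.dropWhile (· == a))) (fun x => x)).Nodup := by
          refine List.nodup_cons.2 ⟨fun h => ?_, ?_⟩
          · have := (PySem.List.mem_sorted _ _ _ a).1 h
            exact hanotin ((PySem.Set.mem_ofList _ a).1 this)
          · exact List.Perm.nodup
              (List.Perm.symm (PySem.List.sorted_perm _ _ _))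
              (PySem.Set.nodup_ofList _)
        rw [List.perm_ext_iff_of_nodup hnd1 (PySem.Set.nodup_ofList _)]
        intro x
        simp only [PySem.Set.mem_ofList, List.mem_cons, PySem.List.mem_sorted]
        constructor
        · rintro (rfl | hx)
          · exact Or.inl rfl
          · exact Or.inr (hrest_sub.mem hx)
        · rintro (rfl | hx)
          · exact Or.inl rfl
          · have hx' : x ∈ t.takeWhile (· == a) ++ t.dropWhile (· == a) := by
              rw [hsplit]; exact hx
            rcases List.mem_append.1 hx' with h | h
            · exact Or.inl (hrun x h)
            · exact Or.inr h
      · refine List.pairwise_cons.2 ⟨?_, PySem.List.sorted_ofList_pairwise_lt _⟩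
        intro y hy
        exact hlt y ((PySem.Set.mem_ofList _ y).1 ((PySem.List.mem_sorted _ _ _ y).1 hy))
    have hrec := rle_sorted_eq n (t.dropWhile (· == a))
      (le_trans (List.length_dropWhile_le _ _) (by simpa using hlen)) hrest_pw
    rw [rleRuns, hkeys, List.map_cons, hrec, ← hcount_a]
    congr 1
    apply List.map_congr_left
    intro k hk
    have hk' : k ∈ t.dropWhile (· == a) :=
      (PySem.Set.mem_ofList _ k).1 ((PySem.List.mem_sorted _ _ _ k).1 hk)
    rw [hcount_rest k hk']

lemma count_dict_alt_eq_canon (data : List Int) : count_dict_alt data = canonCount data := by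
  show rleRuns (PySem.List.sorted data (fun x => x)) = _
  have hperm : (PySem.List.sorted data (fun x => x)).Perm data :=
    PySem.List.sorted_perm data (fun x => x) false
  rw [rle_sorted_eq (PySem.List.sorted data (fun x => x)).length _ (le_refl _)
    (by simpa using PySem.List.sorted_pairwise data (fun x => x))]
  unfold canonCount
  have hkeys : PySem.List.sorted (PySem.Set.ofList (PySem.List.sorted data (fun x => x))) (fun x => x)
      = PySem.List.sorted (PySem.Set.ofList data) (fun x => x) := by
    apply PySem.List.sorted_eq_sorted_of_perm _ _ _ (fun _ _ h => h)
    rw [List.perm_ext_iff_of_nodup (PySem.Set.nodup_ofList _) (PySem.Set.nodup_ofList _)]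
    intro x
    simp only [PySem.Set.mem_ofList, PySem.List.mem_sorted]
  rw [hkeys]
  apply List.map_congr_left
  intro k _
  rw [hperm.count_eq k]

-- ===== VERDICT (by name: the statement is the Claim_ definition above) =====
theorem count_dict_spec : Claim_equal_count_dict := by
  intro data _
  show count_dict data = count_dict_alt data
  rw [count_dict_eq_canon, count_dict_alt_eq_canon]
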